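-- pv_equiv track=rewrite | github.com/glody007/dedale | app/utils.py | dict_contient
-- ===== SOURCE A (Python) =====
-- def dict_contient(dico_conteneur = {}, dico_contenu = {}):
--     for key in dico_contenu:
--         try:
--             if dico_conteneur[key] != dico_contenu[key]:
--                 return False
--         except KeyError:
--             return False
--     return True
-- ===== SOURCE B (Python) =====
-- def dict_contient(dico_conteneur = {}, dico_contenu = {}):
--     return {**dico_conteneur, **dico_contenu} == dico_conteneur
-- ===== Notes on version B (the rewrite author's own statement) =====
-- stated objective: alternative
-- what changed: Instead of iterating contenu's keys with per-key lookups and KeyError handling, B merges contenu over a copy of conteneur ({**a, **b}) and tests whether the merge left the dict unchanged by whole-dict equality.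
import Mathlib
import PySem

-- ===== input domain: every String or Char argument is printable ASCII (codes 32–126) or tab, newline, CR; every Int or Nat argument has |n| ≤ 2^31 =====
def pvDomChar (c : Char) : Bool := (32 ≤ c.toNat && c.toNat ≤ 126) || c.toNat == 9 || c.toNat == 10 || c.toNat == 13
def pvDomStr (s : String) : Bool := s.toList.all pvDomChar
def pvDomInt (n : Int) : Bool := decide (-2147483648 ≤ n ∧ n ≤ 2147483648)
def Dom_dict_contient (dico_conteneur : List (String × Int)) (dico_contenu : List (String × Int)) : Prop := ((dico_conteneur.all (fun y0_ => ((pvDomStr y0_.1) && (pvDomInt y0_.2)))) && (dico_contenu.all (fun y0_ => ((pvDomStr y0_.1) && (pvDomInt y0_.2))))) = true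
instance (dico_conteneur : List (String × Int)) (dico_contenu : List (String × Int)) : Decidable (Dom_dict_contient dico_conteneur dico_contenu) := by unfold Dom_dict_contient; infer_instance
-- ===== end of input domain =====

-- B replaces A's key loop with lookups and KeyError handling by a merge-and-compare: {**conteneur, **contenu} == conteneur (alternative decomposition, same cost).
-- ===== PORT A =====
-- A iterates the keys of dico_contenu; each step looks up dico_conteneur[key] (KeyError -> return False)
-- and compares it with dico_contenu[key]; mismatch -> return False; otherwise return True at the end.
def pvLoopA (dA dB : PySem.Dict String Int) : List String → Bool
  | [] => true
  | k :: ks =>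
    match dA.get? k, dB.get? k with
    | some w, some v => if w ≠ v then false else pvLoopA dA dB ks
    | _, _ => false          -- KeyError branch: return False

def dict_contient (dico_conteneur : List (String × Int)) (dico_contenu : List (String × Int)) : Bool :=
  let dA := PySem.Dict.ofList dico_conteneur
  let dB := PySem.Dict.ofList dico_contenu
  pvLoopA dA dB dB.keys

-- ===== PORT B =====
-- Python dict equality d1 == d2: equal lengths, and every item of d1 found equal by lookup in d2 (order-insensitive) — exact.
def pvDictEq (d1 d2 : PySem.Dict String Int) : Bool :=
  d1.size == d2.size && d1.items.all (fun p => d2.get? p.1 == some p.2)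

-- {**dico_conteneur, **dico_contenu} inserts conteneur's pairs then contenu's pairs into a fresh dict, i.e. ofList (conteneur ++ contenu); then compare with conteneur's dict.
def dict_contient_alt (dico_conteneur : List (String × Int)) (dico_contenu : List (String × Int)) : Bool :=
  pvDictEq (PySem.Dict.ofList (dico_conteneur ++ dico_contenu)) (PySem.Dict.ofList dico_conteneur)

-- ===== PRECONDITION & SPEC =====
def Spec_dict_contient (dico_conteneur : List (String × Int)) (dico_contenu : List (String × Int)) (out : Bool) : Prop := out = dict_contient_alt dico_conteneur dico_contenu
instance (dico_conteneur : List (String × Int)) (dico_contenu : List (String × Int)) (out : Bool) : Decidable (Spec_dict_contient dico_conteneur dico_contenu out) := by unfold Spec_dict_contient; infer_instance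

-- ===== CLAIM (what is proved, stated in full; the proofs are below) =====
def Claim_equal_dict_contient : Prop := ∀ (dico_conteneur : List (String × Int)) (dico_contenu : List (String × Int)), Dom_dict_contient dico_conteneur dico_contenu → Spec_dict_contient dico_conteneur dico_contenu (dict_contient dico_conteneur dico_contenu)

-- ===== LEMMAS AND PROOFS =====

-- A's loop over the keys of a list of pairs whose lookups in dB are their second components
theorem pvLoopA_eq (dA dB : PySem.Dict String Int)
    (l : List (String × Int)) (hl : ∀ p ∈ l, dB.get? p.1 = some p.2) :
    pvLoopA dA dB (l.map Prod.fst) = l.all (fun p => dA.get? p.1 == some p.2) := by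
  induction l with
  | nil => rfl
  | cons p t ih =>
    have hp : dB.get? p.1 = some p.2 := hl p (List.mem_cons_self)
    have ht : ∀ q ∈ t, dB.get? q.1 = some q.2 := fun q hq => hl q (List.mem_cons_of_mem _ hq)
    simp only [List.map_cons, List.all_cons, pvLoopA, hp, ih ht]
    cases h : dA.get? p.1 with
    | none => simp
    | some w => by_cases hw : w = p.2 <;> simp [hw]

-- lookup in a fold of inserts: the suffix dict wins, else fall back to the base dict
theorem get?_foldl_insert (l : List (String × Int)) (d : PySem.Dict String Int) (k : String) :
    (l.foldl (fun d p => d.insert p.1 p.2) d).get? k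
      = ((l.foldl (fun d p => d.insert p.1 p.2) PySem.Dict.empty).get? k).or (d.get? k) := by
  induction l using List.reverseRecOn with
  | nil => simp [PySem.Dict.get?_empty]
  | append_singleton t p ih =>
    simp only [List.foldl_append, List.foldl_cons, List.foldl_nil, PySem.Dict.get?_insert]
    by_cases hk : k = p.1 <;> simp [hk, ih]

theorem ofList_eq_foldl (l : List (String × Int)) :
    PySem.Dict.ofList l = l.foldl (fun d p => d.insert p.1 p.2) PySem.Dict.empty := rfl

-- (ofList b).keys as a set is the first components of b
theorem mem_keys_ofList (b : List (String × Int)) (k : String) :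
    k ∈ (PySem.Dict.ofList b).keys ↔ k ∈ b.map Prod.fst := by
  rw [ofList_eq_foldl]
  rw [PySem.Dict.keys_foldl_insert_key b Prod.fst (fun d x => x.2) PySem.Dict.empty]
  simp [PySem.Dict.keys_empty, PySem.Set.update_nil_left, PySem.Set.mem_ofList]

def pvP (dA dB : PySem.Dict String Int) : Bool :=
  dB.items.all (fun p => dA.get? p.1 == some p.2)

-- if every item of ofList b already looks up equal in ofList a, merging b over a changes nothing
theorem merged_eq (a b : List (String × Int))
    (h : pvP (PySem.Dict.ofList a) (PySem.Dict.ofList b) = true) :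
    PySem.Dict.ofList (a ++ b) = PySem.Dict.ofList a := by
  set dA := PySem.Dict.ofList a with hdA
  set dB := PySem.Dict.ofList b with hdB
  have hsub : ∀ k v, dB.get? k = some v → dA.get? k = some v := by
    intro k v hk
    have hmem : (k, v) ∈ dB.items :=
      PySem.Dict.mem_items_of_get?_eq_some dB hk
    have := (List.all_eq_true.mp h) (k, v) hmem
    simpa using this
  have hget : ∀ k, (PySem.Dict.ofList (a ++ b)).get? k = dA.get? k := by
    intro k
    have : PySem.Dict.ofList (a ++ b) = b.foldl (fun d p => d.insert p.1 p.2) dA := by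
      rw [ofList_eq_foldl, List.foldl_append, ← ofList_eq_foldl]
    rw [this, get?_foldl_insert, ← ofList_eq_foldl, ← hdB]
    cases hB : dB.get? k with
    | none => simp
    | some v => simp [hsub k v hB]
  have hkeys : (PySem.Dict.ofList (a ++ b)).keys = dA.keys := by
    have hks : ∀ k, k ∈ b.map Prod.fst → k ∈ dA.keys := by
      intro k hk
      have hkB : k ∈ dB.keys := (mem_keys_ofList b k).mpr hk
      cases hB : dB.get? k with
      | none => exact absurd ((PySem.Dict.get?_eq_none_iff_not_mem_keys dB k).mp hB) (by simpa using hkB)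
      | some v =>
        have := hsub k v hB
        by_contra hnot
        rw [(PySem.Dict.get?_eq_none_iff_not_mem_keys dA k).mpr hnot] at this
        simp at this
    have : PySem.Dict.ofList (a ++ b) = b.foldl (fun d p => d.insert p.1 p.2) dA := by
      rw [ofList_eq_foldl, List.foldl_append, ← ofList_eq_foldl]
    rw [this, PySem.Dict.keys_foldl_insert_key b Prod.fst (fun d x => x.2) dA]
    rw [PySem.Set.update_eq_append_filter]
    have hfil : ((PySem.Set.ofList (b.map Prod.fst)).filter
        (fun y => !(PySem.Set.contains dA.keys y))) = [] := by
      apply List.filter_eq_nil_iff.mpr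
      intro y hy
      have : y ∈ b.map Prod.fst := (PySem.Set.mem_ofList _ _).mp hy
      simp [hks y this]
    rw [hfil, List.append_nil]
  apply PySem.Dict.ext
  rw [PySem.Dict.items_eq_map_keys _ (PySem.Dict.nodup_keys_ofList (a ++ b)) 0,
      PySem.Dict.items_eq_map_keys dA (PySem.Dict.nodup_keys_ofList a) 0, hkeys]
  apply List.map_congr_left
  intro k _
  simp [PySem.Dict.getD_eq_get?_getD, hget k]

-- a dict equals itself under Python ==
theorem pvDictEq_self (d : PySem.Dict String Int) (h : d.keys.Nodup) : pvDictEq d d = true := by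
  unfold pvDictEq
  simp only [beq_self_eq_true, Bool.true_and, List.all_eq_true]
  intro p hp
  simp [PySem.Dict.get?_of_mem_items d hp h]

-- ===== VERDICT (by name: the statement is the Claim_ definition above) =====
theorem dict_contient_spec : Claim_equal_dict_contient := by
  intro a b _
  unfold Spec_dict_contient dict_contient dict_contient_alt
  simp only []
  set dA := PySem.Dict.ofList a with hdA
  set dB := PySem.Dict.ofList b with hdB
  have hBnd : dB.keys.Nodup := hdB ▸ PySem.Dict.nodup_keys_ofList b
  have hkeys : dB.keys = dB.items.map Prod.fst := by simp only [PySem.Dict.keys]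
  have hitems : ∀ p ∈ dB.items, dB.get? p.1 = some p.2 :=
    fun p hp => PySem.Dict.get?_of_mem_items dB hp hBnd
  have hA : pvLoopA dA dB dB.keys = pvP dA dB := by
    rw [hkeys]; exact pvLoopA_eq dA dB dB.items hitems
  rw [hA]
  cases hP : pvP dA dB with
  | true =>
    rw [merged_eq a b (by rw [← hdA, ← hdB]; exact hP)]
    exact (pvDictEq_self dA (hdA ▸ PySem.Dict.nodup_keys_ofList a)).symm
  | false =>
    by_contra hne
    have hEq : pvDictEq (PySem.Dict.ofList (a ++ b)) dA = true := by
      cases hE : pvDictEq (PySem.Dict.ofList (a ++ b)) dA with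
      | true => rfl
      | false => rw [hE] at hne; exact absurd rfl hne
    -- from dict equality extract that every item of merged looks up in dA
    have hall : ∀ p ∈ (PySem.Dict.ofList (a ++ b)).items, dA.get? p.1 = some p.2 := by
      have h2 := hEq
      simp only [pvDictEq, Bool.and_eq_true, List.all_eq_true] at h2
      intro p hp
      have := h2.2 p hp
      simpa using this
    have : pvP dA dB = true := by
      apply List.all_eq_true.mpr
      intro p hp
      have hB : dB.get? p.1 = some p.2 := hitems p hp
      have hM : (PySem.Dict.ofList (a ++ b)).get? p.1 = some p.2 := by
        have hfold : PySem.Dict.ofList (a ++ b) = b.foldl (fun d q => d.insert q.1 q.2) dA := by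
          rw [ofList_eq_foldl, List.foldl_append, ← ofList_eq_foldl, hdA]
        rw [hfold, get?_foldl_insert, ← ofList_eq_foldl, ← hdB, hB]
        simp
      have hmem := PySem.Dict.mem_items_of_get?_eq_some _ hM
      simpa using hall p hmem
    rw [hP] at this; exact Bool.noConfusion this
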